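-- pv_equiv track=rewrite | github.com/kyeong-hyeok/Algorithm_Study | koeyhk/Programmers/완전탐색/42840 모의고사.py | solution
-- ===== SOURCE A (Python) =====
-- def solution(answers):
--     ans = [[1, 2, 3, 4, 5], [2, 1, 2, 3, 2, 4, 2, 5], [3, 3, 1, 1, 2, 2, 4, 4, 5, 5]]
--     inx = 0
--     total = [0, 0, 0]
--     for i in answers:
--         if ans[0][inx % len(ans[0])] == i:
--             total[0] += 1
--         if ans[1][inx % len(ans[1])] == i:
--             total[1] += 1
--         if ans[2][inx % len(ans[2])] == i:
--             total[2] += 1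
--         inx += 1
--     max_ans = max(total)
--     result = []
--     for i in range(len(total)):
--         if total[i] == max_ans:
--             result.append(i+1)
--     return result
-- ===== SOURCE B (Python) =====
-- def solution(answers):
--     patterns = [[1, 2, 3, 4, 5], [2, 1, 2, 3, 2, 4, 2, 5], [3, 3, 1, 1, 2, 2, 4, 4, 5, 5]]
--     # Unroll every pattern to the common period 40 = lcm(5, 8, 10): no modular
--     # indexing is needed any more; answers are consumed in 40-element blocks,
--     # each block matched positionally (zip) against the unrolled patterns.
--     e0, e1, e2 = (p * (40 // len(p)) for p in patterns)
--     s0 = s1 = s2 = 0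
--     i = 0
--     n = len(answers)
--     while i < n:
--         head = answers[i:i + 40]
--         s0 += sum(a == b for a, b in zip(head, e0))
--         s1 += sum(a == b for a, b in zip(head, e1))
--         s2 += sum(a == b for a, b in zip(head, e2))
--         i += 40
--     scores = [s0, s1, s2]
--     best = max(scores)
--     return [k + 1 for k in range(3) if scores[k] == best]
-- ===== Notes on version B (the rewrite author's own statement) =====
-- stated objective: alternative
-- what changed: Replaces A's per-element pass with a shared index and modular lookups into the three patterns by unrolling each pattern to the common period 40 = lcm(5,8,10) and consuming the answers in 40-element blocks matched positionally with zip (no modular arithmetic), accumulating the three scores block by block.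
import Mathlib
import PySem

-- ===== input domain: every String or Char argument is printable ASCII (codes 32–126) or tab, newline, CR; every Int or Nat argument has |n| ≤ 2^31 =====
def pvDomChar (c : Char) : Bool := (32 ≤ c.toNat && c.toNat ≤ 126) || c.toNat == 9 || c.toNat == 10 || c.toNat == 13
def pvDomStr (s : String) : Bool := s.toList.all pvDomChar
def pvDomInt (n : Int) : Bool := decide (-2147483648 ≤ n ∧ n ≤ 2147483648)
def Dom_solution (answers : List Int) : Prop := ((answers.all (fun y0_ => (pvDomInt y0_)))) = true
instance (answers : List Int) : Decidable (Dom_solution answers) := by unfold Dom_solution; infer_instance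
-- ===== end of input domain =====

-- B differs from A by algorithmic decomposition: each pattern is unrolled to the common
-- period 40 and answers are consumed in 40-blocks matched positionally by zip, instead of
-- A's per-element pass with a shared index and modular lookups (same cost).

-- ===== PORT A =====
-- A: one pass over answers with a running index inx and three counters total[0..2]
-- (ported as a 4-tuple state), then max and an index loop collecting the argmaxes.
def solution (answers : List Int) : List Int :=
  let ans : List (List Int) := [[1, 2, 3, 4, 5], [2, 1, 2, 3, 2, 4, 2, 5], [3, 3, 1, 1, 2, 2, 4, 4, 5, 5]]
  let a0 := PySem.List.pyGetD ans 0 []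
  let a1 := PySem.List.pyGetD ans 1 []
  let a2 := PySem.List.pyGetD ans 2 []
  let st := answers.foldl
    (fun (s : Int × Int × Int × Int) i =>
      let t0 := if PySem.List.pyGetD a0 (PySem.Int.mod s.1 (a0.length : Int)) 0 == i then s.2.1 + 1 else s.2.1
      let t1 := if PySem.List.pyGetD a1 (PySem.Int.mod s.1 (a1.length : Int)) 0 == i then s.2.2.1 + 1 else s.2.2.1
      let t2 := if PySem.List.pyGetD a2 (PySem.Int.mod s.1 (a2.length : Int)) 0 == i then s.2.2.2 + 1 else s.2.2.2
      (s.1 + 1, t0, t1, t2))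
    (0, 0, 0, 0)
  let total : List Int := [st.2.1, st.2.2.1, st.2.2.2]
  let max_ans := (PySem.List.max? total (fun y => y)).getD 0   -- total is nonempty, so max? is some
  (PySem.List.pyRange 0 (total.length : Int) 1).foldl
    (fun r i => if PySem.List.pyGetD total i 0 == max_ans then r ++ [i + 1] else r) []

-- ===== PORT B =====
-- sum(a == b for a, b in zip(xs, P))
def zipCount (xs P : List Int) : Int :=
  ((xs.zip P).map (fun ab => if ab.1 == ab.2 then (1 : Int) else 0)).sum

-- B's while loop: an index i stepping by 40; score the block answers[i:i+40]
-- against the three unrolled patterns by zip, then advance.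
def goIdx (e0 e1 e2 : List Int) (answers : List Int) (s0 s1 s2 i : Int) : Int × Int × Int :=
  if h : i < (answers.length : Int) then
    let head := PySem.List.slice answers (some i) (some (i + 40))
    goIdx e0 e1 e2 answers (s0 + zipCount head e0) (s1 + zipCount head e1)
      (s2 + zipCount head e2) (i + 40)
  else (s0, s1, s2)
termination_by ((answers.length : Int) - i).toNat
decreasing_by omega

def solution_alt (answers : List Int) : List Int :=
  let patterns : List (List Int) := [[1, 2, 3, 4, 5], [2, 1, 2, 3, 2, 4, 2, 5], [3, 3, 1, 1, 2, 2, 4, 4, 5, 5]]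
  let p0 := PySem.List.pyGetD patterns 0 []
  let p1 := PySem.List.pyGetD patterns 1 []
  let p2 := PySem.List.pyGetD patterns 2 []
  let e0 := PySem.List.pyRepeat p0 (PySem.Int.floordiv 40 (p0.length : Int))
  let e1 := PySem.List.pyRepeat p1 (PySem.Int.floordiv 40 (p1.length : Int))
  let e2 := PySem.List.pyRepeat p2 (PySem.Int.floordiv 40 (p2.length : Int))
  let st := goIdx e0 e1 e2 answers 0 0 0 0
  let scores : List Int := [st.1, st.2.1, st.2.2]
  let best := (PySem.List.max? scores (fun y => y)).getD 0   -- scores is nonempty, so max? is some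
  (PySem.List.pyRange 0 3 1).filterMap
    (fun k => if PySem.List.pyGetD scores k 0 == best then some (k + 1) else none)

-- ===== PRECONDITION & SPEC =====
def Spec_solution (answers : List Int) (out : List Int) : Prop := out = solution_alt answers
instance (answers : List Int) (out : List Int) : Decidable (Spec_solution answers out) := by unfold Spec_solution; infer_instance

-- ===== CLAIM (what is proved, stated in full; the proofs are below) =====
def Claim_equal_solution : Prop := ∀ (answers : List Int), Dom_solution answers → Spec_solution answers (solution answers)

-- ===== LEMMAS AND PROOFS =====

-- proof-side spec: the cyclic score of pattern p against xs, starting at position n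
def scoreFrom (p : List Int) : Int → List Int → Int
  | _, [] => 0
  | n, a :: tl =>
      (if a == PySem.List.pyGetD p (PySem.Int.mod n (p.length : Int)) 0 then (1 : Int) else 0)
        + scoreFrom p (n + 1) tl

-- Int's == is symmetric (A tests pattern == answer, the spec tests answer == pattern)
lemma beq_comm_int (a b : Int) : (a == b) = (b == a) := by simp [eq_comm]

-- A's interleaved fold, started at index n with counters t0 t1 t2, lands on
-- (n + |answers|, t0 + score of pattern 0 from n, …, …).
lemma fold_eq (p0 p1 p2 : List Int) (answers : List Int) :
    ∀ (n t0 t1 t2 : Int),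
    answers.foldl
      (fun (s : Int × Int × Int × Int) i =>
        let u0 := if PySem.List.pyGetD p0 (PySem.Int.mod s.1 (p0.length : Int)) 0 == i then s.2.1 + 1 else s.2.1
        let u1 := if PySem.List.pyGetD p1 (PySem.Int.mod s.1 (p1.length : Int)) 0 == i then s.2.2.1 + 1 else s.2.2.1
        let u2 := if PySem.List.pyGetD p2 (PySem.Int.mod s.1 (p2.length : Int)) 0 == i then s.2.2.2 + 1 else s.2.2.2
        (s.1 + 1, u0, u1, u2))
      (n, t0, t1, t2)
    = (n + answers.length,
       t0 + scoreFrom p0 n answers,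
       t1 + scoreFrom p1 n answers,
       t2 + scoreFrom p2 n answers) := by
  induction answers with
  | nil => intro n t0 t1 t2; simp [scoreFrom]
  | cons a tl ih =>
    intro n t0 t1 t2
    simp only [List.foldl_cons, List.length_cons, scoreFrom]
    rw [ih]
    simp only [Prod.mk.injEq]
    refine ⟨by push_cast; ring, ?_, ?_, ?_⟩ <;>
      (rw [beq_comm_int]; split_ifs <;> ring)

-- splitting the scored list splits the score
lemma scoreFrom_append (p : List Int) :
    ∀ (u v : List Int) (n : Int),
    scoreFrom p n (u ++ v) = scoreFrom p n u + scoreFrom p (n + u.length) v := by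
  intro u
  induction u with
  | nil => intro v n; simp [scoreFrom]
  | cons a tl ih =>
    intro v n
    simp only [List.cons_append, scoreFrom, ih, List.length_cons]
    push_cast
    ring_nf

-- shifting the start by 40 does not change the score when p's length divides 40
lemma scoreFrom_shift (p : List Int)
    (hp : ∀ j : Int, PySem.Int.mod (j + 40) (p.length : Int) = PySem.Int.mod j (p.length : Int)) :
    ∀ (xs : List Int) (n : Int), scoreFrom p (n + 40) xs = scoreFrom p n xs := by
  intro xs
  induction xs with
  | nil => intro n; simp [scoreFrom]
  | cons a tl ih =>
    intro n
    simp only [scoreFrom, hp]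
    have : n + 40 + 1 = (n + 1) + 40 := by ring
    rw [this, ih]

-- score of a prefix no longer than E equals the positional zip-count against E,
-- when E lists p cyclically from position n
lemma zip_score (p : List Int) :
    ∀ (xs E : List Int) (n : Int),
    xs.length ≤ E.length →
    (∀ i : Nat, i < E.length →
        E.getD i 0 = PySem.List.pyGetD p (PySem.Int.mod (n + (i : Int)) (p.length : Int)) 0) →
    zipCount xs E = scoreFrom p n xs := by
  intro xs
  induction xs with
  | nil => intro E n _ _; simp [zipCount, scoreFrom]
  | cons a tl ih =>
    intro E n hlen hE
    cases E with
    | nil => simp at hlen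
    | cons e E' =>
      have h0 := hE 0 (by simp)
      simp only [List.getD_cons_zero, Int.natCast_zero, add_zero] at h0
      have hE' : ∀ i : Nat, i < E'.length →
          E'.getD i 0 = PySem.List.pyGetD p (PySem.Int.mod ((n + 1) + (i : Int)) (p.length : Int)) 0 := by
        intro i hi
        have := hE (i + 1) (by simpa using Nat.succ_lt_succ hi)
        simpa [List.getD_cons_succ, show n + ((i:Int) + 1) = (n + 1) + (i:Int) by ring,
               Int.natCast_add] using this
      have hl : tl.length ≤ E'.length := by simpa using hlen
      simp only [zipCount, List.zip_cons_cons, List.map_cons, List.sum_cons, scoreFrom, h0]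
      rw [show ((tl.zip E').map (fun ab => if ab.1 == ab.2 then (1:Int) else 0)).sum = zipCount tl E' from rfl,
          ih E' (n + 1) hl hE']

-- the three unrolled patterns (period 40)
def E0 : List Int := PySem.List.pyRepeat [1, 2, 3, 4, 5] 8
def E1 : List Int := PySem.List.pyRepeat [2, 1, 2, 3, 2, 4, 2, 5] 5
def E2 : List Int := PySem.List.pyRepeat [3, 3, 1, 1, 2, 2, 4, 4, 5, 5] 4

-- splitting at 40 with a 40-periodic pattern
lemma scoreFrom_split40 (p : List Int)
    (hp : ∀ j : Int, PySem.Int.mod (j + 40) (p.length : Int) = PySem.Int.mod j (p.length : Int))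
    (xs : List Int) :
    scoreFrom p 0 xs = scoreFrom p 0 (xs.take 40) + scoreFrom p 0 (xs.drop 40) := by
  conv_lhs => rw [← List.take_append_drop 40 xs]
  rw [scoreFrom_append]
  by_cases h : 40 ≤ xs.length
  · have hl : ((xs.take 40).length : Int) = 40 := by
      simp [List.length_take]; omega
    rw [hl, scoreFrom_shift p hp]
  · have hd : xs.drop 40 = [] := by
      apply List.drop_eq_nil_of_le; omega
    simp [hd, scoreFrom]

lemma hp5 : ∀ j : Int, PySem.Int.mod (j + 40) (([1,2,3,4,5] : List Int).length : Int)
    = PySem.Int.mod j (([1,2,3,4,5] : List Int).length : Int) := by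
  intro j
  have hc : ((([1,2,3,4,5] : List Int).length : Int)) = 5 := by norm_num
  simp only [hc, PySem.Int.mod_eq_emod_of_pos (show (0:Int) < 5 by norm_num)]
  omega

lemma hp8 : ∀ j : Int, PySem.Int.mod (j + 40) (([2,1,2,3,2,4,2,5] : List Int).length : Int)
    = PySem.Int.mod j (([2,1,2,3,2,4,2,5] : List Int).length : Int) := by
  intro j
  have hc : ((([2,1,2,3,2,4,2,5] : List Int).length : Int)) = 8 := by norm_num
  simp only [hc, PySem.Int.mod_eq_emod_of_pos (show (0:Int) < 8 by norm_num)]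
  omega

lemma hp10 : ∀ j : Int, PySem.Int.mod (j + 40) (([3,3,1,1,2,2,4,4,5,5] : List Int).length : Int)
    = PySem.Int.mod j (([3,3,1,1,2,2,4,4,5,5] : List Int).length : Int) := by
  intro j
  have hc : ((([3,3,1,1,2,2,4,4,5,5] : List Int).length : Int)) = 10 := by norm_num
  simp only [hc, PySem.Int.mod_eq_emod_of_pos (show (0:Int) < 10 by norm_num)]
  omega

-- B's index loop computes the three cyclic scores of the unconsumed suffix
lemma goIdx_eq (answers : List Int) : ∀ (N : Nat) (i : Int), 0 ≤ i →
    (((answers.length : Int) - i)).toNat ≤ N → ∀ (s0 s1 s2 : Int),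
    goIdx E0 E1 E2 answers s0 s1 s2 i
      = (s0 + scoreFrom [1,2,3,4,5] 0 (answers.drop i.toNat),
         s1 + scoreFrom [2,1,2,3,2,4,2,5] 0 (answers.drop i.toNat),
         s2 + scoreFrom [3,3,1,1,2,2,4,4,5,5] 0 (answers.drop i.toNat)) := by
  intro N
  induction N with
  | zero =>
    intro i hi hN s0 s1 s2
    have hle : ¬ i < (answers.length : Int) := by omega
    have hnil : answers.drop i.toNat = [] := List.drop_eq_nil_of_le (by omega)
    unfold goIdx
    simp [hle, hnil, scoreFrom]
  | succ N ih =>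
    intro i hi hN s0 s1 s2
    unfold goIdx
    by_cases h : i < (answers.length : Int)
    · rw [dif_pos h]
      have hhead : PySem.List.slice answers (some i) (some (i + 40))
          = (answers.drop i.toNat).take 40 := by
        rw [PySem.List.slice_toNat answers hi (by omega : (0:Int) ≤ i + 40),
            show (i + 40).toNat - i.toNat = 40 by omega]
      rw [hhead, ih (i + 40) (by omega) (by omega)]
      set rest := answers.drop i.toNat with hrest
      have hdrop : answers.drop (i + 40).toNat = rest.drop 40 := by
        rw [hrest, List.drop_drop, show i.toNat + 40 = (i + 40).toNat by omega]
      have hz0 : zipCount (rest.take 40) E0 = scoreFrom [1,2,3,4,5] 0 (rest.take 40) := by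
        apply zip_score
        · rw [show E0.length = 40 from by decide]
          simp [List.length_take]
        · decide
      have hz1 : zipCount (rest.take 40) E1 = scoreFrom [2,1,2,3,2,4,2,5] 0 (rest.take 40) := by
        apply zip_score
        · rw [show E1.length = 40 from by decide]
          simp [List.length_take]
        · decide
      have hz2 : zipCount (rest.take 40) E2 = scoreFrom [3,3,1,1,2,2,4,4,5,5] 0 (rest.take 40) := by
        apply zip_score
        · rw [show E2.length = 40 from by decide]
          simp [List.length_take]
        · decide
      rw [hdrop, hz0, hz1, hz2, scoreFrom_split40 [1,2,3,4,5] hp5 rest,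
          scoreFrom_split40 [2,1,2,3,2,4,2,5] hp8 rest,
          scoreFrom_split40 [3,3,1,1,2,2,4,4,5,5] hp10 rest]
      simp only [Prod.mk.injEq]
      refine ⟨by ring, by ring, by ring⟩
    · rw [dif_neg h]
      have hnil : answers.drop i.toNat = [] := List.drop_eq_nil_of_le (by omega)
      simp [hnil, scoreFrom]

-- the tail computation (max + collect) agrees for a 3-element totals list
lemma tail_eq (t0 t1 t2 : Int) :
    (PySem.List.pyRange 0 ((([t0, t1, t2] : List Int)).length : Int) 1).foldl
      (fun r i => if PySem.List.pyGetD ([t0, t1, t2] : List Int) i 0 == (PySem.List.max? [t0, t1, t2] (fun y => y)).getD 0 then r ++ [i + 1] else r) []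
    = (PySem.List.pyRange 0 3 1).filterMap
      (fun k => if PySem.List.pyGetD ([t0, t1, t2] : List Int) k 0 == (PySem.List.max? [t0, t1, t2] (fun y => y)).getD 0 then some (k + 1) else none) := by
  have hl : ((([t0, t1, t2] : List Int)).length : Int) = 3 := by simp
  rw [hl, show PySem.List.pyRange 0 3 1 = [0, 1, 2] from by decide]
  rw [PySem.List.max?_id_cons]
  simp only [List.foldl_cons, List.foldl_nil, List.filterMap_cons, List.filterMap_nil,
    Option.getD_some,
    show PySem.List.pyGetD [t0, t1, t2] 0 0 = t0 from by simp [pysem],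
    show PySem.List.pyGetD [t0, t1, t2] 1 0 = t1 from by simp [pysem],
    show PySem.List.pyGetD [t0, t1, t2] 2 0 = t2 from by simp [pysem]]
  split_ifs <;> simp

-- ===== VERDICT (by name: the statement is the Claim_ definition above) =====
theorem solution_spec : Claim_equal_solution := by
  intro answers _
  show solution answers = solution_alt answers
  unfold solution solution_alt
  dsimp only
  rw [show (PySem.List.pyGetD ([[1, 2, 3, 4, 5], [2, 1, 2, 3, 2, 4, 2, 5], [3, 3, 1, 1, 2, 2, 4, 4, 5, 5]] : List (List Int)) 0 []) = [1, 2, 3, 4, 5] from by decide,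
      show (PySem.List.pyGetD ([[1, 2, 3, 4, 5], [2, 1, 2, 3, 2, 4, 2, 5], [3, 3, 1, 1, 2, 2, 4, 4, 5, 5]] : List (List Int)) 1 []) = [2, 1, 2, 3, 2, 4, 2, 5] from by decide,
      show (PySem.List.pyGetD ([[1, 2, 3, 4, 5], [2, 1, 2, 3, 2, 4, 2, 5], [3, 3, 1, 1, 2, 2, 4, 4, 5, 5]] : List (List Int)) 2 []) = [3, 3, 1, 1, 2, 2, 4, 4, 5, 5] from by decide]
  rw [show PySem.List.pyRepeat ([1, 2, 3, 4, 5] : List Int) (PySem.Int.floordiv 40 ((([1, 2, 3, 4, 5] : List Int)).length : Int)) = E0 from by decide,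
      show PySem.List.pyRepeat ([2, 1, 2, 3, 2, 4, 2, 5] : List Int) (PySem.Int.floordiv 40 ((([2, 1, 2, 3, 2, 4, 2, 5] : List Int)).length : Int)) = E1 from by decide,
      show PySem.List.pyRepeat ([3, 3, 1, 1, 2, 2, 4, 4, 5, 5] : List Int) (PySem.Int.floordiv 40 ((([3, 3, 1, 1, 2, 2, 4, 4, 5, 5] : List Int)).length : Int)) = E2 from by decide]
  rw [fold_eq, goIdx_eq answers answers.length 0 (le_refl _) (by omega)]
  rw [show ((0:Int)).toNat = 0 from rfl, List.drop_zero]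
  simp only [zero_add]
  exact tail_eq _ _ _
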